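-- pv_equiv track=rewrite | github.com/yz4004/codeforce-python | daily/problem_list/2025/1114.py | mat_vec
-- ===== SOURCE A (Python) =====
-- MOD = 10 ** 9 + 7
--
-- def mat_vec(A, x, mod=MOD):
--     m = len(A)
--     b = [0] * m
--     for i, Ai in enumerate(A):
--         bi = 0
--         for aij, xj in zip(Ai, x):
--             bi = (bi + aij * xj) % mod
--         b[i] = bi
--     return b
-- ===== SOURCE B (Python) =====
-- MOD = 10 ** 9 + 7
--
-- def mat_vec(A, x, mod=MOD):
--     # column-oriented (axpy) product: scan the matrix column by column,
--     # updating all m accumulators in parallel; only the matrix's actual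
--     # columns (up to the longest row) need to be visited
--     b = [0] * len(A)
--     ncols = max(map(len, A), default=0)
--     for j, xj in enumerate(x[:ncols]):
--         b = [(bi + Ai[j] * xj) % mod if j < len(Ai) else bi
--              for bi, Ai in zip(b, A)]
--     return b
-- ===== Notes on version B (the rewrite author's own statement) =====
-- stated objective: alternative
-- what changed: Row-by-row dot products replaced by a column-oriented (axpy) sweep: b starts as all zeros and for each column j (x truncated to the widest row) all m accumulators are updated in parallel via a zip comprehension, guarded by j < len(Ai) to reproduce zip's per-row truncation.
import Mathlib
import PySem

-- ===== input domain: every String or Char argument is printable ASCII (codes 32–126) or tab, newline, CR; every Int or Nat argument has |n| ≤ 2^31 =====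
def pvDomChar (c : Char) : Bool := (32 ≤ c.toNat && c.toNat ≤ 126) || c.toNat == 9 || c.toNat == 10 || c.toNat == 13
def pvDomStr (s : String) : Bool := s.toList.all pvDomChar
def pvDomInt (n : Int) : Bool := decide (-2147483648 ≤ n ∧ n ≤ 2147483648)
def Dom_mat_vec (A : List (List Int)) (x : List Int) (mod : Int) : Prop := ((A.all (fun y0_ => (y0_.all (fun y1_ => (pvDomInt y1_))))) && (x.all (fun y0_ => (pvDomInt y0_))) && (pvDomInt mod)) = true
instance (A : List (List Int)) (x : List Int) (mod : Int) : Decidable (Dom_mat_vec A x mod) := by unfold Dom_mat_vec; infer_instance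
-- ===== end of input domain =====

-- B computes the same matrix-vector product column by column (axpy sweep) instead of row by row; alternative decomposition, same results.

-- ===== PORT A =====
def mat_vec (A : List (List Int)) (x : List Int) (mod : Int) : List Int :=
  let m := A.length
  let b := List.replicate m (0 : Int)
  (PySem.List.enumerate A).foldl
    (fun b p =>
      let bi := (p.2.zip x).foldl (fun bi q => PySem.Int.mod (bi + q.1 * q.2) mod) 0
      PySem.List.pySetD b p.1 bi)   -- b[i] = bi; i is always in range
    b

-- ===== PORT B =====
def mat_vec_alt (A : List (List Int)) (x : List Int) (mod : Int) : List Int :=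
  let ncols := PySem.List.maxD (A.map (fun Ai => (Ai.length : Int))) id 0
  (PySem.List.enumerate (PySem.List.slice x none (some ncols))).foldl
    (fun b p =>
      (b.zip A).map (fun q =>
        if p.1 < (q.2.length : Int) then PySem.Int.mod (q.1 + PySem.List.pyGetD q.2 p.1 0 * p.2) mod
        else q.1))
    (List.replicate A.length (0 : Int))

-- ===== PRECONDITION & SPEC =====
-- Pre_ excludes exactly the inputs where Python A raises ZeroDivisionError:
-- mod = 0 together with a nonempty x and at least one nonempty row (B raises there too).
def Pre_mat_vec (A : List (List Int)) (x : List Int) (mod : Int) : Prop :=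
  mod ≠ 0 ∨ x = [] ∨ A.all (fun Ai => Ai.isEmpty) = true
instance (A : List (List Int)) (x : List Int) (mod : Int) : Decidable (Pre_mat_vec A x mod) := by unfold Pre_mat_vec; infer_instance

def pvWitness_mat_vec : List (List Int) × List Int × Int := ([[1, 2], [3]], [4, 5], 7)

def Spec_mat_vec (A : List (List Int)) (x : List Int) (mod : Int) (out : List Int) : Prop := out = mat_vec_alt A x mod
instance (A : List (List Int)) (x : List Int) (mod : Int) (out : List Int) : Decidable (Spec_mat_vec A x mod out) := by unfold Spec_mat_vec; infer_instance

-- ===== CLAIM (what is proved, stated in full; the proofs are below) =====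
def Claim_equal_mat_vec : Prop := ∀ (A : List (List Int)) (x : List Int) (mod : Int), Dom_mat_vec A x mod → Pre_mat_vec A x mod → Spec_mat_vec A x mod (mat_vec A x mod)

-- ===== LEMMAS AND PROOFS =====

-- the number of columns B sweeps: max(map(len, A), default=0)
def pvNcols (A : List (List Int)) : Int :=
  PySem.List.maxD (A.map (fun Ai => (Ai.length : Int))) id 0

-- the per-row dot product of A's inner loop
def pvRowS (x : List Int) (m : Int) (Ai : List Int) : Int :=
  (Ai.zip x).foldl (fun bi q => PySem.Int.mod (bi + q.1 * q.2) m) 0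

-- the per-row accumulator history of B's column sweep
def pvColT (x : List Int) (m : Int) (Ai : List Int) : Int :=
  (PySem.List.enumerate x).foldl
    (fun v p => if p.1 < (Ai.length : Int) then PySem.Int.mod (v + PySem.List.pyGetD Ai p.1 0 * p.2) m else v) 0

def pvSP (l : List (Int × Int)) : Int := (l.map (fun q => q.1 * q.2)).sum

lemma pv_mod_add_left (a b m : Int) : PySem.Int.mod (PySem.Int.mod a m + b) m = PySem.Int.mod (a + b) m := by
  simp only [PySem.Int.mod]
  conv_rhs => rw [← Int.fmod_add_mul_fdiv a m]
  rw [add_right_comm, Int.add_mul_fmod_self_left]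

lemma pvA_char (A : List (List Int)) (x : List Int) (m : Int) :
    mat_vec A x m = A.map (pvRowS x m) := by
  suffices h : ∀ (A' : List (List Int)) (k : Nat) (b : List Int), b.length = k + A'.length →
      (PySem.List.enumerate A' (k : Int)).foldl
        (fun b p => PySem.List.pySetD b p.1 ((p.2.zip x).foldl (fun bi q => PySem.Int.mod (bi + q.1 * q.2) m) 0))
        b = b.take k ++ A'.map (pvRowS x m) by
    have := h A 0 (List.replicate A.length 0) (by simp)
    simpa [mat_vec, pvRowS] using this
  intro A'
  induction A' with
  | nil =>
    intro k b hb
    simp only [List.length_nil, Nat.add_zero] at hb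
    simp [PySem.List.enumerate_nil, List.take_of_length_le (le_of_eq hb)]
  | cons Ai rest ih =>
    intro k b hb
    have hk : k < b.length := by simp at hb; omega
    rw [PySem.List.enumerate_cons]
    simp only [List.foldl_cons]
    have hset : PySem.List.pySetD b (k : Int) (pvRowS x m Ai) = b.set k (pvRowS x m Ai) := by
      simp [PySem.List.pySetD_natCast]
    have hrec := ih (k + 1) (b.set k (pvRowS x m Ai)) (by simp at hb ⊢; omega)
    have hcast : ((k : Int) + 1) = ((k + 1 : Nat) : Int) := by push_cast; ring
    rw [show ((Ai.zip x).foldl (fun bi q => PySem.Int.mod (bi + q.1 * q.2) m) 0) = pvRowS x m Ai from rfl,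
        hset, hcast, hrec]
    have htake : (b.set k (pvRowS x m Ai)).take (k + 1) = b.take k ++ [pvRowS x m Ai] := by
      rw [List.take_add_one, List.take_set_of_le (le_refl k)]
      simp [hk]
    rw [htake]
    simp

lemma pvB_char (A : List (List Int)) (x : List Int) (m : Int) :
    mat_vec_alt A x m = A.map (pvColT (PySem.List.slice x none (some (pvNcols A))) m) := by
  suffices h : ∀ (ps : List (Int × Int)) (g : List Int → Int),
      ps.foldl
        (fun b p => (b.zip A).map (fun q =>
          if p.1 < (q.2.length : Int) then PySem.Int.mod (q.1 + PySem.List.pyGetD q.2 p.1 0 * p.2) m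
          else q.1))
        (A.map g)
      = A.map (fun Ai => ps.foldl
          (fun v p => if p.1 < (Ai.length : Int) then PySem.Int.mod (v + PySem.List.pyGetD Ai p.1 0 * p.2) m else v)
          (g Ai)) by
    have := h (PySem.List.enumerate (PySem.List.slice x none (some (pvNcols A)))) (fun _ => 0)
    simpa [mat_vec_alt, pvNcols, pvColT, List.map_const'] using this
  intro ps
  induction ps with
  | nil => intro g; simp
  | cons p ps ih =>
    intro g
    simp only [List.foldl_cons]
    have hz : (A.map g).zip A = A.map (fun Ai => (g Ai, Ai)) := by
      have := List.zip_map' (f := g) (g := (id : List (Int) → List Int)) (l := A)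
      simpa using this
    rw [hz, List.map_map]
    exact ih (fun Ai => if p.1 < (Ai.length : Int) then PySem.Int.mod (g Ai + PySem.List.pyGetD Ai p.1 0 * p.2) m else g Ai)

lemma pvS_acc (m : Int) :
    ∀ (l : List (Int × Int)) (v : Int),
      l.foldl (fun bi q => PySem.Int.mod (bi + q.1 * q.2) m) (PySem.Int.mod v m)
      = PySem.Int.mod (v + pvSP l) m := by
  intro l
  induction l with
  | nil => intro v; simp [pvSP]
  | cons q l ih =>
    intro v
    simp only [List.foldl_cons]
    rw [pv_mod_add_left, ih (v + q.1 * q.2)]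
    simp [pvSP, add_assoc]

lemma pvT_acc (Ai : List Int) (m : Int) :
    ∀ (xs : List Int) (k : Nat) (v : Int),
      (PySem.List.enumerate xs (k : Int)).foldl
        (fun v p => if p.1 < (Ai.length : Int) then PySem.Int.mod (v + PySem.List.pyGetD Ai p.1 0 * p.2) m else v)
        (PySem.Int.mod v m)
      = PySem.Int.mod (v + pvSP ((Ai.drop k).zip xs)) m := by
  intro xs
  induction xs with
  | nil => intro k v; simp [PySem.List.enumerate_nil, pvSP]
  | cons xj xs ih =>
    intro k v
    rw [PySem.List.enumerate_cons]
    simp only [List.foldl_cons]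
    by_cases hk : k < Ai.length
    · rw [if_pos (by exact_mod_cast hk)]
      have hget : PySem.List.pyGetD Ai (k : Int) 0 = Ai[k] := by
        rw [PySem.List.pyGetD_natCast]
        simp [List.getD, List.getElem?_eq_getElem hk]
      have hdrop : Ai.drop k = Ai[k] :: Ai.drop (k + 1) := List.drop_eq_getElem_cons hk
      rw [hget, pv_mod_add_left,
        show ((k : Int) + 1) = ((k + 1 : Nat) : Int) by push_cast; ring,
        ih (k + 1) (v + Ai[k] * xj)]
      conv_rhs => rw [hdrop]
      simp only [pvSP, List.zip_cons_cons, List.map_cons, List.sum_cons]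
      exact congrArg (fun t => PySem.Int.mod t m) (by ring)
    · rw [if_neg (by exact_mod_cast hk)]
      have h1 : Ai.drop k = [] := List.drop_eq_nil_of_le (by omega)
      have h2 : Ai.drop (k + 1) = [] := List.drop_eq_nil_of_le (by omega)
      rw [show ((k : Int) + 1) = ((k + 1 : Nat) : Int) by push_cast; ring, ih, h1, h2]
      simp [pvSP]

lemma pv_zip_take (Ai : List Int) : ∀ (n : Nat) (x : List Int), Ai.length ≤ n →
    Ai.zip (x.take n) = Ai.zip x := by
  induction Ai with
  | nil => intro n x _; simp
  | cons a Ai ih =>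
    intro n x hn
    cases x with
    | nil => simp
    | cons y x =>
      cases n with
      | zero => simp at hn
      | succ n => simp only [List.take_succ_cons, List.zip_cons_cons, ih n x (by simpa using hn)]

lemma pv_ncols_nonneg (A : List (List Int)) : 0 ≤ pvNcols A := by
  unfold pvNcols PySem.List.maxD
  rcases h : PySem.List.max? (A.map (fun Ai => (Ai.length : Int))) id with _ | m
  · rw [h]; simp
  · rw [h]
    have hm := PySem.List.max?_mem h
    simp only [List.mem_map] at hm
    obtain ⟨Ai, _, rfl⟩ := hm
    simp

lemma pv_len_le_ncols (A : List (List Int)) (Ai : List Int) (hAi : Ai ∈ A) :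
    (Ai.length : Int) ≤ pvNcols A := by
  unfold pvNcols PySem.List.maxD
  rcases h : PySem.List.max? (A.map (fun Ai => (Ai.length : Int))) id with _ | m
  · rw [PySem.List.max?_eq_none_iff] at h
    exact absurd (List.mem_map_of_mem (f := fun Ai => (Ai.length : Int)) hAi) (by simp [h])
  · rw [h, Option.getD_some]
    simpa using PySem.List.max?_isMax h _ (List.mem_map_of_mem hAi)

lemma pvT_eq_S (Ai x : List Int) (m : Int) : pvColT x m Ai = pvRowS x m Ai := by
  have hT := pvT_acc Ai m x 0 0
  have hS := pvS_acc m (Ai.zip x) 0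
  simp only [Nat.cast_zero, List.drop_zero, zero_add] at hT hS
  rw [pvColT, pvRowS]
  rw [show (PySem.Int.mod 0 m) = 0 by simp [PySem.Int.mod]] at hT hS
  rw [hT, hS]

-- ===== VERDICT (by name: the statement is the Claim_ definition above) =====
theorem mat_vec_spec : Claim_equal_mat_vec := by
  intro A x m _ _
  unfold Spec_mat_vec
  rw [pvA_char, pvB_char]
  refine List.map_congr_left (fun Ai hAi => ?_)
  rw [PySem.List.slice_to _ (pv_ncols_nonneg A)]
  rw [show pvRowS x m Ai = pvRowS (x.take (pvNcols A).toNat) m Ai by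
    unfold pvRowS
    rw [pv_zip_take Ai (pvNcols A).toNat x (by
      have := pv_len_le_ncols A Ai hAi; omega)]]
  exact (pvT_eq_S Ai (x.take (pvNcols A).toNat) m).symm
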